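-- pv_equiv track=rewrite | github.com/kmnlange/kayla_cpsc50000_assignments | Week 3/file_content_stats(1).py | characters
-- ===== SOURCE A (Python) =====
-- def characters(new_rows): #Counts the number of characters per line in the file, excluding spaces
--     characters_per_line: list[int] = []
--     for row in new_rows:
--         total_characters = 0
--         words = row.split()
--         characters = [len(characters) for characters in words]
--         total_characters = sum(characters)
--         characters_per_line.append(total_characters)
--     return characters_per_line
-- ===== SOURCE B (Python) =====
-- def characters(new_rows):  # B: count non-whitespace characters of each row directly, no split/word-length pass
--     return [sum(1 for ch in row if not ch.isspace()) for row in new_rows]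
-- ===== Notes on version B (the rewrite author's own statement) =====
-- stated objective: simpler
-- what changed: Replaces A's split-into-words / per-word-length / sum decomposition (with an appending accumulator loop) by a single list comprehension that counts non-whitespace characters of each row directly.
import Mathlib
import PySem

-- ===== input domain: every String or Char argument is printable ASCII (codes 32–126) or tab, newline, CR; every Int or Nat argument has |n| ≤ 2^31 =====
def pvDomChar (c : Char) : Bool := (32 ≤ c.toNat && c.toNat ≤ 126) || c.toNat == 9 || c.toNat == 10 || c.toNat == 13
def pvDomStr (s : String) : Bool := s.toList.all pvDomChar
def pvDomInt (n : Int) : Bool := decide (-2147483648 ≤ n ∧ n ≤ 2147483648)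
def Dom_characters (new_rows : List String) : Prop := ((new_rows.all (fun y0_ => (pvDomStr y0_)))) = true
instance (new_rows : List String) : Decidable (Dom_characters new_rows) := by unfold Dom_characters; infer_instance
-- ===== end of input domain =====

-- B counts non-whitespace characters of each row directly instead of A's split / word-lengths / sum decomposition ('simpler').

-- ===== PORT A =====
-- for row in new_rows: words = row.split(); append(sum(len(w) for w in words))
def characters (new_rows : List String) : List Int :=
  new_rows.foldl
    (fun characters_per_line row =>
      let words := PySem.Str.split₀ row
      let chars := words.map (fun w => (PySem.Str.len w : Int))
      let total_characters := chars.sum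
      characters_per_line ++ [total_characters])
    []

-- ===== PORT B =====
-- [sum(1 for ch in row if not ch.isspace()) for row in new_rows]
def characters_alt (new_rows : List String) : List Int :=
  new_rows.map (fun row => (row.toList.countP (fun c => !PySem.Chars.isspace c) : Int))

-- ===== PRECONDITION & SPEC =====
def Spec_characters (new_rows : List String) (out : List Int) : Prop := out = characters_alt new_rows
instance (new_rows : List String) (out : List Int) : Decidable (Spec_characters new_rows out) := by unfold Spec_characters; infer_instance

-- ===== CLAIM (what is proved, stated in full; the proofs are below) =====
def Claim_equal_characters : Prop := ∀ (new_rows : List String), Dom_characters new_rows → Spec_characters new_rows (characters new_rows)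

-- ===== LEMMAS AND PROOFS =====

-- loop invariant for split₀.go: total word length produced = words already emitted + pending word + non-space chars of the rest
theorem pv_go_sum (s cur : List Char) (acc : List (List Char)) :
    ((PySem.Chars.split₀.go s cur acc).map List.length).sum
      = (acc.map List.length).sum + cur.length + s.countP (fun c => !PySem.Chars.isspace c) := by
  induction s generalizing cur acc with
  | nil =>
    simp only [PySem.Chars.split₀.go, List.countP_nil]
    split_ifs with h
    · simp [List.isEmpty_iff.mp h]
    · simp
  | cons c rest ih =>
    simp only [PySem.Chars.split₀.go]
    by_cases hs : PySem.Chars.isspace c = true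
    · rw [if_pos hs]
      by_cases hc : cur.isEmpty = true
      · rw [if_pos hc, ih]
        simp [List.isEmpty_iff.mp hc, hs]
      · rw [if_neg hc, ih]
        simp [hs]
        omega
    · rw [if_neg hs, ih]
      simp [hs]
      omega

theorem pv_cast_sum (L : List (List Char)) :
    (L.map (fun l => ((l.length : Int)))).sum = ((L.map List.length).sum : Int) := by
  induction L with
  | nil => simp
  | cons x xs ih => simp [ih]

-- total word length of row.split() = number of non-whitespace characters of row
theorem pv_row_sum (row : String) :
    ((PySem.Str.split₀ row).map (fun w => (PySem.Str.len w : Int))).sum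
      = (row.toList.countP (fun c => !PySem.Chars.isspace c) : Int) := by
  have h := pv_go_sum row.toList [] []
  simp only [List.map_nil, List.sum_nil, List.length_nil] at h
  have hmap : ((fun w => (PySem.Str.len w : Int)) ∘ String.ofList)
      = fun l : List Char => (l.length : Int) := by
    funext l
    simp [PySem.Str.len]
  simp only [PySem.Str.split₀, PySem.Chars.split₀, List.map_map, hmap, pv_cast_sum, h]
  omega

theorem pv_foldl_append (f : String → Int) (l : List String) (init : List Int) :
    l.foldl (fun a r => a ++ [f r]) init = init ++ l.map f := by
  induction l generalizing init with
  | nil => simp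
  | cons x xs ih => simp [ih]

-- ===== VERDICT (by name: the statement is the Claim_ definition above) =====
theorem characters_spec : Claim_equal_characters := by
  intro new_rows _
  unfold Spec_characters characters characters_alt
  rw [pv_foldl_append (fun row => ((PySem.Str.split₀ row).map (fun w => (PySem.Str.len w : Int))).sum)]
  simp only [List.nil_append]
  exact List.map_congr_left (fun row _ => pv_row_sum row)
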